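-- pv_equiv track=rewrite | github.com/Imaginatorix/GHiFMo | genetic/clusters.py | select_balanced_population
-- ===== SOURCE A (Python) =====
-- def select_balanced_population(mol_data, population_size):
--     """
--     Selects molecules from each cluster, prioritizing lower ranks.
--
--     Parameters:
--     mol_data (list of tuples): Each entry is a tuple in the form (Mol, (rank, cluster)).
--     population_size (int): The size of the new population to select.
--
--     Returns:
--     list: Selected molecules with equal representation from each cluster, sorted by rank.
--     """
--
--     # Sort by rank within each cluster
--     from collections import defaultdict
--
--     cluster_dict = defaultdict(list)
--
--     # Group molecules by cluster and sort by rank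
--     for mol, (rank, cluster) in mol_data:
--         cluster_dict[cluster].append((rank, mol))
--
--     # Sort each cluster list by rank
--     for cluster in cluster_dict:
--         cluster_dict[cluster].sort(key=lambda x: x[0])  # Sort by rank ascending
--
--     # Select molecules equally from each cluster
--     selected_population = []
--     cluster_keys = list(cluster_dict.keys())
--
--     i = 0
--     while len(selected_population) < population_size:
--         cluster_key = cluster_keys[i % len(cluster_keys)]
--         if cluster_dict[cluster_key]:
--             selected_population.append(cluster_dict[cluster_key].pop(0)[1])
--         i += 1
--
--     return selected_population
-- ===== SOURCE B (Python) =====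
-- def select_balanced_population(mol_data, population_size):
--     # Group by cluster, sort each bucket by rank (stable), then emit whole
--     # round-robin rounds over the still-nonempty queues and truncate once,
--     # instead of popping one element per iteration of an index-counting loop.
--     buckets = {}
--     for mol, (rank, cluster) in mol_data:
--         buckets.setdefault(cluster, []).append((rank, mol))
--     queues = [sorted(v, key=lambda x: x[0]) for v in buckets.values()]
--     out = []
--     while queues:
--         out.extend(q[0][1] for q in queues)
--         queues = [q[1:] for q in queues if len(q) > 1]
--     return out[:max(population_size, 0)]
-- ===== Notes on version B (the rewrite author's own statement) =====
-- stated objective: alternative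
-- what changed: Replaces A's one-at-a-time while loop (i % p indexing, pop(0) on each bucket list, rescanning emptied clusters) by whole round-robin rounds over only the still-nonempty queues followed by a single truncation.
import Mathlib
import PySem

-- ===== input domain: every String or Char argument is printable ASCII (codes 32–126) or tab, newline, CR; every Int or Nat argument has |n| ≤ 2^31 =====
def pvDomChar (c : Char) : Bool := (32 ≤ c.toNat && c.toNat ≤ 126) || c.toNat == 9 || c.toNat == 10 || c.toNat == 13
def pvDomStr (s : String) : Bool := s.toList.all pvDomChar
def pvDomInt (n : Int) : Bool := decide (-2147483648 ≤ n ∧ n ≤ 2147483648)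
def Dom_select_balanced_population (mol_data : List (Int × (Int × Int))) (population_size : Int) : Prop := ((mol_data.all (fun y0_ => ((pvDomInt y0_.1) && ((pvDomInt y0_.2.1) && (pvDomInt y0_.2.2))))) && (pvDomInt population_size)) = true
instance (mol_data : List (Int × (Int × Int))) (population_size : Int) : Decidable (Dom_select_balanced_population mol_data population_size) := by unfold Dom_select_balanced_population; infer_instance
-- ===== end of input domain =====

-- B replaces A's one-item-at-a-time selection loop (i % p indexing, pop(0), rescanning
-- emptied clusters) by whole round-robin rounds over the still-nonempty queues plus one
-- truncation. No observable mutation; the equivalence is about the return value.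

-- ===== PORT A =====
-- grouping loop: cluster_dict[cluster].append((rank, mol)) on a defaultdict(list)
def pv_group (mol_data : List (Int × (Int × Int))) : PySem.Dict Int (List (Int × Int)) :=
  mol_data.foldl (fun d p => d.modify p.2.2 [] (· ++ [(p.2.1, p.1)])) PySem.Dict.empty

-- 'for cluster in cluster_dict: cluster_dict[cluster].sort(key=lambda x: x[0])'
def pvA_sortvals (d : PySem.Dict Int (List (Int × Int))) : PySem.Dict Int (List (Int × Int)) :=
  d.keys.foldl (fun acc k => acc.insert k (PySem.List.sorted (acc.getD k []) (fun x => x.1))) d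

-- the 'while len(selected_population) < population_size' loop; the fuel parameter only
-- makes the (outside Pre_ non-terminating) Python loop total — under Pre_ it suffices.
def pvA_loop (pop : Int) (keys : List Int) :
    PySem.Dict Int (List (Int × Int)) → List Int → Nat → Nat → List Int
  | _, sel, _, 0 => sel
  | d, sel, i, fuel+1 =>
    if (sel.length : Int) < pop then
      let k := keys.getD (i % keys.length) 0
      match d.getD k [] with
      | [] => pvA_loop pop keys d sel (i+1) fuel
      | x :: rest => pvA_loop pop keys (d.insert k rest) (sel ++ [x.2]) (i+1) fuel
    else sel

def select_balanced_population (mol_data : List (Int × (Int × Int))) (population_size : Int) : List Int :=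
  let d := pvA_sortvals (pv_group mol_data)
  let cluster_keys := d.keys
  pvA_loop population_size cluster_keys d [] 0
    ((mol_data.length + 1) * (cluster_keys.length + 1))

-- ===== PORT B =====
-- Source B's grouping loop 'buckets.setdefault(cluster, []).append((rank, mol))' builds the
-- same dictionary as A's defaultdict loop, so both ports share pv_group.
-- 'queues = [q[1:] for q in queues if len(q) > 1]'  (q[1:] = List.tail by PySem.List.slice_from_one)
def pvB_step (queues : List (List (Int × Int))) : List (List (Int × Int)) :=
  (queues.filter (fun q => 1 < q.length)).map List.tail

-- termination measure fact for the while loop (cited by pvB_loop's decreasing_by)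
theorem pvB_step_sum_lt (q : List (Int × Int)) (qs : List (List (Int × Int))) :
    ((pvB_step (q :: qs)).map (fun q => q.length + 1)).sum < (((q :: qs)).map (fun q => q.length + 1)).sum := by
  unfold pvB_step
  have h1 : ∀ (l : List (List (Int × Int))),
      (((l.filter (fun q => 1 < q.length)).map List.tail).map (fun q => q.length + 1)).sum
        ≤ (l.map (fun q => q.length)).sum := by
    intro l
    induction l with
    | nil => simp
    | cons x t ih =>
      by_cases hx : 1 < x.length
      · simp only [List.filter_cons, hx, decide_true, if_true, List.map_cons, List.sum_cons]
        have : x.tail.length + 1 = x.length := by cases x <;> simp_all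
        omega
      · simp only [List.filter_cons, hx, decide_false, Bool.false_eq_true, if_false,
          List.map_cons, List.sum_cons]
        omega
  have := h1 (q :: qs)
  have h2 : ((q :: qs).map (fun q => q.length)).sum < ((q :: qs).map (fun q => q.length + 1)).sum := by
    have : ∀ (l : List (List (Int × Int))), (l.map (fun q => q.length)).sum + l.length = (l.map (fun q => q.length + 1)).sum := by
      intro l; induction l with
      | nil => simp
      | cons x t ih => simp only [List.map_cons, List.sum_cons, List.length_cons]; omega
    have := this (q :: qs); simp only [List.length_cons] at this; omega
  omega

-- 'while queues: out.extend(q[0][1] for q in queues); queues = [q[1:] for q in queues if len(q) > 1]'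
-- (q[0] ported as pyGetD q 0 _, exact since every queue in rotation is nonempty)
def pvB_loop (queues : List (List (Int × Int))) (out : List Int) : List Int :=
  if queues = [] then out
  else pvB_loop (pvB_step queues) (out ++ queues.map (fun q => (PySem.List.pyGetD q 0 (0, 0)).2))
termination_by (queues.map (fun q => q.length + 1)).sum
decreasing_by
  rename_i h
  cases queues with
  | nil => exact absurd rfl h
  | cons q qs => exact pvB_step_sum_lt q qs

def select_balanced_population_alt (mol_data : List (Int × (Int × Int))) (population_size : Int) : List Int :=
  let buckets := pv_group mol_data
  let queues := buckets.values.map (fun v => PySem.List.sorted v (fun x => x.1))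
  let out := pvB_loop queues []
  PySem.List.slice out none (some (max population_size 0))

-- ===== PRECONDITION & SPEC =====
-- Pre_ excludes exactly the inputs on which A never returns: with population_size >
-- len(mol_data) A's while loop spins forever (and raises ZeroDivisionError when
-- mol_data == [] and 0 < population_size).
def Pre_select_balanced_population (mol_data : List (Int × (Int × Int))) (population_size : Int) : Prop :=
  population_size ≤ (mol_data.length : Int)
instance (mol_data : List (Int × (Int × Int))) (population_size : Int) : Decidable (Pre_select_balanced_population mol_data population_size) := by unfold Pre_select_balanced_population; infer_instance

def pvWitness_select_balanced_population : (List (Int × (Int × Int))) × Int :=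
  ([(10, (1, 0)), (11, (0, 0)), (12, (0, 1))], 3)

def Spec_select_balanced_population (mol_data : List (Int × (Int × Int))) (population_size : Int) (out : List Int) : Prop := out = select_balanced_population_alt mol_data population_size
instance (mol_data : List (Int × (Int × Int))) (population_size : Int) (out : List Int) : Decidable (Spec_select_balanced_population mol_data population_size out) := by unfold Spec_select_balanced_population; infer_instance

-- ===== CLAIM (what is proved, stated in full; the proofs are below) =====
def Claim_equal_select_balanced_population : Prop := ∀ (mol_data : List (Int × (Int × Int))) (population_size : Int), Dom_select_balanced_population mol_data population_size → Pre_select_balanced_population mol_data population_size → Spec_select_balanced_population mol_data population_size (select_balanced_population mol_data population_size)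


-- ===== LEMMAS AND PROOFS =====

def rrA (pop : Int) : List (List (Int × Int)) → List Int → Nat → Nat → List Int
  | _, sel, _, 0 => sel
  | qs, sel, i, fuel+1 =>
    if (sel.length : Int) < pop then
      match qs.getD (i % qs.length) [] with
      | [] => rrA pop qs sel (i+1) fuel
      | x :: rest => rrA pop (qs.set (i % qs.length) rest) (sel ++ [x.2]) (i+1) fuel
    else sel

theorem rrA_of_ge (pop : Int) (qs : List (List (Int × Int))) (sel : List Int) (i fuel : Nat)
    (h : pop ≤ (sel.length : Int)) : rrA pop qs sel i fuel = sel := by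
  cases fuel <;> simp [rrA]; omega

theorem rrOut_dec (qs : List (List (Int × Int))) (h : ¬ qs.all List.isEmpty = true) :
    ((qs.map List.tail).map List.length).sum < (qs.map List.length).sum := by
  induction qs with
  | nil => simp at h
  | cons q t ih =>
    simp only [List.all_cons, Bool.and_eq_true, not_and_or] at h
    rcases h with h | h
    · have hlen : q.tail.length < q.length := by cases q <;> simp_all
      have : ((t.map List.tail).map List.length).sum ≤ (t.map List.length).sum := by
        simp only [List.map_map]
        apply List.sum_le_sum; intro x hx; simp only [Function.comp_apply]
        cases x <;> simp
      simp only [List.map_cons, List.sum_cons]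
      omega
    · have := ih h
      have hlen : q.tail.length ≤ q.length := by cases q <;> simp
      simp only [List.map_cons, List.sum_cons]
      omega

def rrOut : List (List (Int × Int)) → List Int
  | qs =>
    if qs.all List.isEmpty then []
    else qs.filterMap (fun q => q.head?.map (·.2)) ++ rrOut (qs.map List.tail)
termination_by qs => (qs.map List.length).sum
decreasing_by simpa using rrOut_dec qs (by assumption)

theorem sortvals_getD (ks : List Int) (hk : ks.Nodup) (d : PySem.Dict Int (List (Int × Int))) (j : Int) :
    ((ks.foldl (fun acc k => acc.insert k (PySem.List.sorted (acc.getD k []) (fun x => x.1))) d)).getD j []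
      = if j ∈ ks then PySem.List.sorted (d.getD j []) (fun x => x.1) else d.getD j [] := by
  induction ks generalizing d with
  | nil => simp
  | cons k ks ih =>
    simp only [List.foldl_cons]
    rw [ih (by simp_all) (d.insert k (PySem.List.sorted (d.getD k []) (fun x => x.1)))]
    simp only [List.nodup_cons] at hk
    by_cases hj : j = k
    · subst hj
      simp [hk.1, PySem.Dict.getD_insert_self]
    · rw [PySem.Dict.getD_insert]
      simp [List.mem_cons, hj]

theorem set_update_of_subset (l s : List Int) (h : ∀ x ∈ l, x ∈ s) : PySem.Set.update s l = s := by
  induction l generalizing s with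
  | nil => rfl
  | cons x t ih =>
    have hx : x ∈ s := h x (by simp)
    have : PySem.Set.add s x = s := by
      simp [PySem.Set.add, PySem.Set.contains, List.elem_eq_mem, hx]
    simp only [PySem.Set.update, List.foldl_cons] at *
    rw [this]
    exact ih s (fun y hy => h y (by simp [hy]))

theorem sortvals_keys (ks : List Int) (d : PySem.Dict Int (List (Int × Int)))
    (hsub : ∀ k ∈ ks, k ∈ d.keys) :
    ((ks.foldl (fun acc k => acc.insert k (PySem.List.sorted (acc.getD k []) (fun x => x.1))) d)).keys = d.keys := by
  rw [PySem.Dict.keys_foldl_insert]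
  exact set_update_of_subset ks d.keys hsub
-- dict → list simulation of A's selection loop

theorem map_getD_insert (keys : List Int) (hnd : keys.Nodup) (d : PySem.Dict Int (List (Int × Int)))
    (j : Nat) (hj : j < keys.length) (rest : List (Int × Int)) :
    keys.map (fun k' => (d.insert keys[j] rest).getD k' []) = (keys.map (fun k' => d.getD k' [])).set j rest := by
  apply List.ext_getElem
  · simp
  · intro n h1 h2
    have hn' : n < keys.length := by simpa using h1
    by_cases hn : n = j
    · subst hn
      simp only [List.getElem_map, List.getElem_set]
      rw [PySem.Dict.getD_insert]
      simp
    · have hne2 : keys[n]'hn' ≠ keys[j] := fun he => hn ((List.Nodup.getElem_inj_iff hnd).mp he)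
      simp only [List.getElem_map, List.getElem_set]
      rw [PySem.Dict.getD_insert, if_neg hne2, if_neg (fun he => hn he.symm)]

theorem pvA_loop_eq_rrA (pop : Int) (keys : List Int) (fuel : Nat) :
    ∀ (d : PySem.Dict Int (List (Int × Int))) (sel : List Int) (i : Nat),
    keys.Nodup → (∀ k, k ∉ keys → d.getD k [] = []) →
    pvA_loop pop keys d sel i fuel = rrA pop (keys.map (fun k => d.getD k [])) sel i fuel := by
  induction fuel with
  | zero => intros; rfl
  | succ fuel ih =>
    intro d sel i hnd hout
    rw [pvA_loop, rrA]
    by_cases hlt : (sel.length : Int) < pop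
    · simp only [hlt, if_true, List.length_map]
      by_cases hne : keys = []
      · subst hne
        simp only [List.getD_nil, List.map_nil]
        rw [hout 0 (by simp)]
        exact ih d sel (i+1) hnd hout
      · have hplen : 0 < keys.length := List.length_pos_iff.mpr hne
        have hj : i % keys.length < keys.length := Nat.mod_lt _ hplen
        have hk : keys.getD (i % keys.length) 0 = keys[i % keys.length] := List.getD_eq_getElem _ _ hj
        have hq : (keys.map (fun k => d.getD k [])).getD (i % keys.length) [] = d.getD keys[i % keys.length] [] := by
          rw [List.getD_eq_getElem _ _ (by simpa using hj)]
          simp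
        rw [hk, hq]
        rcases hval : d.getD keys[i % keys.length] [] with _ | ⟨x, rest⟩
        · exact ih d sel (i+1) hnd hout
        · show pvA_loop pop keys (d.insert keys[i % keys.length] rest) (sel ++ [x.2]) (i+1) fuel =
              rrA pop ((List.map (fun k => d.getD k []) keys).set (i % keys.length) rest) (sel ++ [x.2]) (i+1) fuel
          rw [ih (d.insert keys[i % keys.length] rest) (sel ++ [x.2]) (i+1) hnd ?_]
          · rw [map_getD_insert keys hnd d _ hj rest]
          · intro k hkk
            rw [PySem.Dict.getD_insert]
            have : k ≠ keys[i % keys.length] := by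
              intro he; exact hkk (he ▸ List.getElem_mem hj)
            simp [this, hout k hkk]
    · simp [hlt]
-- one round of rrA, positions j..p-1

theorem rrA_round (pop : Int) (p : Nat) (hp : 0 < p) :
    ∀ (m j : Nat), j + m = p → ∀ (c fuel' : Nat) (qs : List (List (Int × Int))) (sel : List Int),
    qs.length = p →
    rrA pop qs sel (c * p + j) (m + fuel') =
      if pop ≤ (sel.length : Int) then sel
      else if pop ≤ (sel.length : Int) + (((qs.drop j).filterMap (fun q => q.head?.map (·.2))).length : Int)
        then sel ++ ((qs.drop j).filterMap (fun q => q.head?.map (·.2))).take (pop - sel.length).toNat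
        else rrA pop (qs.take j ++ (qs.drop j).map List.tail) (sel ++ (qs.drop j).filterMap (fun q => q.head?.map (·.2))) ((c+1) * p) fuel' := by
  intro m
  induction m with
  | zero =>
    intro j hj c fuel' qs sel hlen
    have hjp : j = p := by omega
    subst hjp
    rw [Nat.zero_add]
    have hd : qs.drop j = [] := List.drop_eq_nil_of_le (by omega)
    have ht : qs.take j = qs := List.take_of_length_le (by omega)
    rw [hd, ht]
    simp only [List.filterMap_nil, List.length_nil, List.map_nil, List.append_nil, List.take_nil]
    by_cases h1 : pop ≤ (sel.length : Int)
    · rw [if_pos h1]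
      exact rrA_of_ge pop qs sel _ _ h1
    · rw [if_neg h1, if_neg (by push_cast; omega)]
      have h2 : c * j + j = (c + 1) * j := by ring
      rw [h2]
  | succ m ih =>
    intro j hj c fuel' qs sel hlen
    have hjlt : j < p := by omega
    have hmod : (c * p + j) % p = j := by
      rw [Nat.mul_comm, Nat.mul_add_mod]
      exact Nat.mod_eq_of_lt hjlt
    have hjq : j < qs.length := by omega
    have hf : m + 1 + fuel' = (m + fuel') + 1 := by omega
    rw [hf, rrA, hlen, hmod]
    have hq : qs.getD j [] = qs[j]'hjq := List.getD_eq_getElem _ _ hjq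
    have hdrop : qs.drop j = qs[j]'hjq :: qs.drop (j+1) := List.drop_eq_getElem_cons hjq
    have htake : qs.take (j+1) = qs.take j ++ [qs[j]'hjq] := by
      rw [List.take_succ]
      simp [List.getElem?_eq_getElem hjq]
    by_cases h1 : pop ≤ (sel.length : Int)
    · rw [if_neg (by omega), if_pos h1]
    · have hlt : (sel.length : Int) < pop := by omega
      rw [if_pos hlt, if_neg h1, hq]
      rcases hval : qs[j]'hjq with _ | ⟨x, rest⟩
      · show rrA pop qs sel (c * p + j + 1) (m + fuel') = _
        have : c * p + j + 1 = c * p + (j + 1) := by omega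
        rw [this, ih (j+1) (by omega) c fuel' qs sel hlen]
        rw [hdrop, hval, htake, hval]
        simp only [List.filterMap_cons, List.head?_nil, List.head?_cons, Option.map_none,
          List.map_cons, List.tail_nil, List.append_assoc, List.cons_append, List.nil_append]
        rw [if_neg h1]
      · show rrA pop (qs.set j rest) (sel ++ [x.2]) (c * p + j + 1) (m + fuel') = _
        have hlen' : (qs.set j rest).length = p := by simp [hlen]
        have hidx : c * p + j + 1 = c * p + (j + 1) := by omega
        rw [hidx, ih (j+1) (by omega) c fuel' (qs.set j rest) (sel ++ [x.2]) hlen']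
        have hds : (qs.set j rest).drop (j+1) = qs.drop (j+1) := by
          rw [List.drop_set]; simp
        have hts : (qs.set j rest).take (j+1) = qs.take j ++ [rest] := by
          rw [List.take_set, List.take_add_one, List.getElem?_eq_getElem hjq, hval]
          have hl : (qs.take j).length = j := by simp; omega
          rw [Option.toList_some, List.set_append_right _ _ (by omega)]
          simp [hl]
        rw [hds, hts, hdrop, hval]
        simp only [List.filterMap_cons, List.head?_cons, Option.map_some, List.map_cons,
          List.tail_cons, List.length_append, List.length_cons, List.length_nil, List.length_singleton]
        push_cast
        set t := (qs.drop (j+1)).filterMap (fun q => q.head?.map (·.2)) with hT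
        split_ifs with hA hB hC hD <;> try omega
        · -- pop ≤ sel.len + 1 and pop ≤ sel.len + (t.len + 1): take 1
          have h1' : (pop - sel.length).toNat = 1 := by omega
          rw [h1']
          simp
        · -- second branches both
          have h1' : (pop - sel.length).toNat = (pop - (sel.length + 1)).toNat + 1 := by omega
          rw [h1', List.take_succ_cons]
          simp
        · -- both recurse
          simp [List.append_assoc]

theorem sum_len_split (qs : List (List (Int × Int))) :
    (qs.map List.length).sum = (qs.filterMap (fun q => q.head?.map (·.2))).length + ((qs.map List.tail).map List.length).sum := by
  induction qs with
  | nil => simp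
  | cons q t ih =>
    cases q <;> simp [List.filterMap_cons, ih] <;> omega

theorem heads_pos (qs : List (List (Int × Int))) (h : ¬ qs.all List.isEmpty = true) :
    0 < (qs.filterMap (fun q => q.head?.map (·.2))).length := by
  rw [List.length_pos_iff]
  intro hc
  rw [List.filterMap_eq_nil_iff] at hc
  simp only [List.all_eq_true, Bool.not_eq_true] at h
  push_neg at h
  obtain ⟨q, hq, hne⟩ := h
  have := hc q hq
  cases q <;> simp_all

theorem rrA_eq_take (pop : Int) :
    ∀ (S : Nat) (qs : List (List (Int × Int))) (sel : List Int) (c fuel : Nat),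
    (qs.map List.length).sum = S →
    pop ≤ (sel.length : Int) + (S : Int) →
    qs.length + S * qs.length ≤ fuel →
    rrA pop qs sel (c * qs.length) fuel = sel ++ (rrOut qs).take (pop - sel.length).toNat := by
  intro S
  induction S using Nat.strong_induction_on with
  | _ S ihS =>
  intro qs sel c fuel hsum hpop hfuel
  by_cases h1 : pop ≤ (sel.length : Int)
  · rw [rrA_of_ge pop qs sel _ _ h1]
    have : (pop - sel.length).toNat = 0 := by omega
    simp [this]
  · have hS : 0 < S := by omega
    have hall : ¬ qs.all List.isEmpty = true := by
      intro hc
      have : (qs.map List.length).sum = 0 := by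
        simp only [List.all_eq_true] at hc
        rw [List.sum_eq_zero_iff]
        intro x hx
        obtain ⟨q, hq, rfl⟩ := List.mem_map.mp hx
        have := hc q hq
        cases q <;> simp_all
      omega
    have hp : 0 < qs.length := by
      rcases qs with _ | _
      · simp at hsum; omega
      · simp
    have hfsplit : fuel = qs.length + (fuel - qs.length) := by omega
    rw [hfsplit]
    have := rrA_round pop qs.length hp qs.length 0 (by omega) c (fuel - qs.length) qs sel rfl
    simp only [Nat.add_zero, List.drop_zero, List.take_zero, List.nil_append] at this
    rw [this, if_neg h1]
    rw [rrOut, if_neg hall]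
    set heads := qs.filterMap (fun q => q.head?.map (·.2)) with hH
    by_cases h2 : pop ≤ (sel.length : Int) + (heads.length : Int)
    · rw [if_pos h2]
      rw [List.take_append_of_le_length (l₁ := heads) (by omega)]
    · rw [if_neg h2]
      have hhp : 0 < heads.length := heads_pos qs hall
      have hsum' : ((qs.map List.tail).map List.length).sum = S - heads.length := by
        have hsplit := sum_len_split qs
        rw [← hH] at hsplit
        omega
      have hlen' : (qs.map List.tail).length = qs.length := by simp
      have hrec := ihS (S - heads.length) (by omega) (qs.map List.tail) (sel ++ heads) (c+1)
        (fuel - qs.length) hsum'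
        (by simp only [List.length_append]; push_cast; omega)
        (by rw [hlen']
            have : (S - heads.length) * qs.length + qs.length ≤ S * qs.length := by
              have h3 : (S - heads.length) + 1 ≤ S := by omega
              calc (S - heads.length) * qs.length + qs.length = ((S - heads.length) + 1) * qs.length := by ring
                _ ≤ S * qs.length := Nat.mul_le_mul_right _ h3
            omega)
      rw [hlen'] at hrec
      rw [hrec]
      rw [List.take_append]
      rw [List.take_of_length_le (l := heads) (by omega)]
      have : (pop - sel.length).toNat - heads.length = (pop - (sel ++ heads).length).toNat := by
        simp only [List.length_append]; omega
      rw [this]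
      simp

theorem heads_filter (qs : List (List (Int × Int))) :
    (qs.filter (fun q => q ≠ [])).filterMap (fun q => q.head?.map (·.2))
      = qs.filterMap (fun q => q.head?.map (·.2)) := by
  induction qs with
  | nil => rfl
  | cons q t ih =>
    simp only [ne_eq, decide_not] at ih ⊢
    cases q <;> simp [List.filter_cons, List.filterMap_cons, ih]

theorem tails_filter (qs : List (List (Int × Int))) :
    ((qs.filter (fun q => q ≠ [])).map List.tail).filter (fun q => q ≠ [])
      = (qs.map List.tail).filter (fun q => q ≠ []) := by
  induction qs with
  | nil => rfl
  | cons q t ih =>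
    simp only [ne_eq, decide_not] at ih ⊢
    cases q <;> simp [List.filter_cons, ih]

theorem all_isEmpty_iff_filter (qs : List (List (Int × Int))) :
    qs.all List.isEmpty = true ↔ qs.filter (fun q => q ≠ []) = [] := by
  rw [List.filter_eq_nil_iff]
  simp only [List.all_eq_true]
  constructor
  · intro h q hq; have := h q hq; cases q <;> simp_all
  · intro h q hq; have := h q hq; cases q <;> simp_all

theorem rrOut_filter :
    ∀ (S : Nat) (qs qs' : List (List (Int × Int))),
    (qs.map List.length).sum = S →
    qs.filter (fun q => q ≠ []) = qs'.filter (fun q => q ≠ []) →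
    rrOut qs = rrOut qs' := by
  intro S
  induction S using Nat.strong_induction_on with
  | _ S ihS =>
  intro qs qs' hsum hfil
  by_cases hall : qs.all List.isEmpty = true
  · have hall' : qs'.all List.isEmpty = true := by
      rw [all_isEmpty_iff_filter] at hall ⊢
      rw [← hfil, hall]
    rw [rrOut, if_pos hall]
    conv_rhs => rw [rrOut]
    rw [if_pos hall']
  · have hall' : ¬ qs'.all List.isEmpty = true := by
      rw [all_isEmpty_iff_filter] at hall ⊢
      rw [← hfil]; exact hall
    rw [rrOut, if_neg hall]
    conv_rhs => rw [rrOut]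
    rw [if_neg hall']
    have hheads : qs.filterMap (fun q => q.head?.map (·.2)) = qs'.filterMap (fun q => q.head?.map (·.2)) := by
      rw [← heads_filter qs, ← heads_filter qs', hfil]
    have htails : (qs.map List.tail).filter (fun q => q ≠ []) = (qs'.map List.tail).filter (fun q => q ≠ []) := by
      rw [← tails_filter qs, ← tails_filter qs', hfil]
    rw [hheads, ihS ((qs.map List.tail).map List.length).sum (hsum ▸ rrOut_dec qs hall)
      (qs.map List.tail) (qs'.map List.tail) rfl htails]

theorem pvB_step_eq (queues : List (List (Int × Int))) :
    pvB_step queues = (queues.map List.tail).filter (fun q => q ≠ []) := by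
  unfold pvB_step
  induction queues with
  | nil => rfl
  | cons q t ih =>
    rcases q with _ | ⟨a, u⟩
    · simpa using ih
    · rcases u with _ | ⟨b, v⟩
      · simpa using ih
      · simp [List.filter_cons, ih]

theorem heads_map (queues : List (List (Int × Int))) (hne : ∀ q ∈ queues, q ≠ []) :
    queues.map (fun q => (PySem.List.pyGetD q 0 ((0 : Int), (0 : Int))).2)
      = queues.filterMap (fun q => q.head?.map (·.2)) := by
  induction queues with
  | nil => rfl
  | cons q t ih =>
    rcases hq : q with _ | ⟨a, u⟩
    · exact absurd hq (hne q (by simp))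
    · simp only [List.map_cons, List.filterMap_cons, List.head?_cons, Option.map_some]
      rw [PySem.List.pyGetD_zero_cons]
      rw [ih (fun x hx => hne x (by simp [hx]))]

theorem pvB_loop_eq_rrOut :
    ∀ (S : Nat) (queues : List (List (Int × Int))) (out : List Int),
    (queues.map (fun q => q.length + 1)).sum = S →
    (∀ q ∈ queues, q ≠ []) →
    pvB_loop queues out = out ++ rrOut queues := by
  intro S
  induction S using Nat.strong_induction_on with
  | _ S ihS =>
  intro queues out hsum hne
  rcases hq : queues with _ | ⟨q, qs⟩
  · rw [pvB_loop]
    rw [rrOut]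
    simp
  · rw [← hq, pvB_loop, if_neg (by simp [hq])]
    have hstep : pvB_step queues = (queues.map List.tail).filter (fun q => q ≠ []) := pvB_step_eq queues
    have hne' : ∀ p ∈ pvB_step queues, p ≠ [] := by
      rw [hstep]; intro p hp
      have := List.of_mem_filter hp
      simpa using this
    have hlt : ((pvB_step queues).map (fun q => q.length + 1)).sum < S := by
      rw [← hsum, hq]
      exact hq ▸ pvB_step_sum_lt q qs
    rw [ihS _ hlt (pvB_step queues) _ rfl hne']
    have hall : ¬ queues.all List.isEmpty = true := by
      rw [hq]
      simp only [List.all_cons, Bool.and_eq_true, not_and_or]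
      left
      have : q ≠ [] := hne q (by simp [hq])
      cases q <;> simp_all
    have hrr : rrOut (pvB_step queues) = rrOut (queues.map List.tail) := by
      apply rrOut_filter (((pvB_step queues).map List.length).sum) _ _ rfl
      rw [hstep, List.filter_filter]
      simp
    rw [hrr, heads_map queues hne]
    conv_rhs => rw [rrOut]
    rw [if_neg hall]
    simp [List.append_assoc]

theorem ind_sum_zero (r1 : Int) : ∀ (s : List Int), r1 ∉ s → (s.map (fun c => if r1 = c then (1 : Nat) else 0)).sum = 0 := by
  intro s hs
  induction s with
  | nil => rfl
  | cons c t ih =>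
    simp only [List.mem_cons, not_or] at hs
    simp [hs.1, ih hs.2]

theorem ind_sum_one (r1 : Int) : ∀ (s : List Int), s.Nodup → r1 ∈ s → (s.map (fun c => if r1 = c then (1 : Nat) else 0)).sum = 1 := by
  intro s
  induction s with
  | nil => simp
  | cons c t ih =>
    intro hnd hmem
    simp only [List.nodup_cons] at hnd
    by_cases hc : r1 = c
    · subst hc
      simp [ind_sum_zero r1 t hnd.1]
    · rcases List.mem_cons.mp hmem with h | h
      · exact absurd h hc
      · simp [hc, ih hnd.2 h]

theorem partition_len (l : List (Int × (Int × Int))) :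
    ∀ (s : List Int), s.Nodup → (∀ r ∈ l, r.1 ∈ s) →
    (s.map (fun c => (l.filter (fun r => r.1 == c)).length)).sum = l.length := by
  induction l with
  | nil => intro s _ _; simp
  | cons r t ih =>
    intro s hnd hmem
    have hpt : ∀ c : Int, ((r :: t).filter (fun x => x.1 == c)).length
        = (t.filter (fun x => x.1 == c)).length + (if r.1 = c then 1 else 0) := by
      intro c
      simp only [List.filter_cons]
      by_cases hc : r.1 = c
      · simp [hc]
      · simp [hc]
    have hsplit : ∀ (s' : List Int),
        (s'.map (fun c => ((r :: t).filter (fun x => x.1 == c)).length)).sum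
          = (s'.map (fun c => (t.filter (fun x => x.1 == c)).length)).sum
            + (s'.map (fun c => if r.1 = c then (1 : Nat) else 0)).sum := by
      intro s'
      induction s' with
      | nil => rfl
      | cons c u ihu =>
        simp only [List.map_cons, List.sum_cons, ihu, hpt c]
        omega
    rw [hsplit s, ih s hnd (fun x hx => hmem x (by simp [hx])),
      ind_sum_one r.1 s hnd (hmem r (by simp))]
    simp

-- ===== VERDICT (by name: the statement is the Claim_ definition above) =====
theorem glue_main (pop : Int) (n : Nat) (d : PySem.Dict Int (List (Int × Int)))
    (hndK : d.keys.Nodup)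
    (hne0 : ∀ k ∈ d.keys, d.getD k [] ≠ [])
    (hsum : ((d.keys.map (fun k => PySem.List.sorted (d.getD k []) (fun x => x.1))).map List.length).sum = n)
    (hout0 : ∀ k, k ∉ d.keys → d.getD k [] = [])
    (hpre : pop ≤ (n : Int)) :
    pvA_loop pop (pvA_sortvals d).keys (pvA_sortvals d) [] 0 ((n + 1) * ((pvA_sortvals d).keys.length + 1))
      = PySem.List.slice (pvB_loop (d.values.map (fun v => PySem.List.sorted v (fun x => x.1))) []) none (some (max pop 0)) := by
  have hkeys2 : (pvA_sortvals d).keys = d.keys := sortvals_keys d.keys d (fun k hk => hk)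
  have hgetD2 : ∀ j, (pvA_sortvals d).getD j []
      = if j ∈ d.keys then PySem.List.sorted (d.getD j []) (fun x => x.1) else d.getD j [] :=
    fun j => sortvals_getD d.keys hndK d j
  have hout2 : ∀ k, k ∉ (pvA_sortvals d).keys → (pvA_sortvals d).getD k [] = [] := by
    intro k hk
    rw [hkeys2] at hk
    rw [hgetD2 k, if_neg hk]
    exact hout0 k hk
  have hqsA : (pvA_sortvals d).keys.map (fun k => (pvA_sortvals d).getD k [])
      = d.keys.map (fun k => PySem.List.sorted (d.getD k []) (fun x => x.1)) := by
    rw [hkeys2]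
    apply List.map_congr_left
    intro k hk
    rw [hgetD2 k, if_pos hk]
  -- A side
  rw [pvA_loop_eq_rrA pop (pvA_sortvals d).keys _ (pvA_sortvals d) [] 0 (hkeys2 ▸ hndK) hout2]
  rw [hqsA]
  have hlenA : (d.keys.map (fun k => PySem.List.sorted (d.getD k []) (fun x => x.1))).length
      = (pvA_sortvals d).keys.length := by rw [hkeys2]; simp
  have h0 : (0 : Nat) = 0 * (d.keys.map (fun k => PySem.List.sorted (d.getD k []) (fun x => x.1))).length := by
    simp
  rw [h0]
  rw [rrA_eq_take pop n _ [] 0 _ hsum (by simpa using hpre)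
    (by rw [hlenA]
        have he : (pvA_sortvals d).keys.length + n * (pvA_sortvals d).keys.length
            = (n + 1) * (pvA_sortvals d).keys.length := by ring
        rw [he]
        exact Nat.mul_le_mul_left _ (by omega))]
  -- B side
  have hvalues : d.values = d.keys.map (fun k => d.getD k []) := PySem.Dict.values_eq_map_keys d hndK []
  have hqsB : d.values.map (fun v => PySem.List.sorted v (fun x => x.1))
      = d.keys.map (fun k => PySem.List.sorted (d.getD k []) (fun x => x.1)) := by
    rw [hvalues, List.map_map]
    rfl
  rw [hqsB]
  rw [pvB_loop_eq_rrOut (((d.keys.map (fun k => PySem.List.sorted (d.getD k []) (fun x => x.1))).map (fun q => q.length + 1)).sum)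
    _ [] rfl
    (by intro q hq
        obtain ⟨k, hk, rfl⟩ := List.mem_map.mp hq
        rw [ne_eq, PySem.List.sorted_eq_nil_iff]
        exact hne0 k hk)]
  rw [PySem.List.slice_to _ (by omega)]
  simp only [List.nil_append, List.length_nil]
  congr 1
  omega

theorem select_balanced_population_spec : Claim_equal_select_balanced_population := by
  intro md pop hdom hpre
  show select_balanced_population md pop = select_balanced_population_alt md pop
  unfold Pre_select_balanced_population at hpre
  have hgroup : pv_group md
      = (md.map (fun p => (p.2.2, (p.2.1, p.1)))).foldl (fun d r => d.modify r.1 [] (· ++ [r.2])) PySem.Dict.empty := by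
    unfold pv_group
    rw [List.foldl_map]
  have hndK : (pv_group md).keys.Nodup := by
    rw [hgroup]
    exact PySem.Dict.nodup_keys_foldl_modify_key _ (fun r : Int × (Int × Int) => r.1) []
      (fun d r => (· ++ [r.2])) PySem.Dict.empty PySem.Dict.nodup_keys_empty
  have hval : ∀ c, (pv_group md).getD c []
      = ((md.map (fun p => (p.2.2, (p.2.1, p.1)))).filter (fun r => r.1 == c)).map (·.2) := by
    intro c
    rw [hgroup]
    have := PySem.Dict.getD_foldl_modify_append
      (l := md.map (fun p => (p.2.2, (p.2.1, p.1)))) (d := PySem.Dict.empty) (c := c)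
    simpa using this
  have hmemK : ∀ k, k ∈ (pv_group md).keys ↔ k ∈ (md.map (fun p => (p.2.2, (p.2.1, p.1)))).map (fun r => r.1) := by
    intro k
    rw [hgroup, PySem.Dict.keys_foldl_modify_key]
    simp only [PySem.Dict.keys_empty]
    rw [show PySem.Set.update [] ((md.map (fun p => (p.2.2, (p.2.1, p.1)))).map (fun r => r.1))
        = PySem.Set.ofList ((md.map (fun p => (p.2.2, (p.2.1, p.1)))).map (fun r => r.1)) from rfl]
    exact PySem.Set.mem_ofList _ _
  have hne0 : ∀ k ∈ (pv_group md).keys, (pv_group md).getD k [] ≠ [] := by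
    intro k hk
    rw [hval k]
    obtain ⟨r, hr, hrk⟩ := List.mem_map.mp ((hmemK k).mp hk)
    intro hcon
    rw [List.map_eq_nil_iff, List.filter_eq_nil_iff] at hcon
    exact hcon r hr (by simp [hrk])
  have hout0 : ∀ k, k ∉ (pv_group md).keys → (pv_group md).getD k [] = [] := by
    intro k hk
    rw [hval k, List.map_eq_nil_iff, List.filter_eq_nil_iff]
    intro r hr hrk
    exact hk ((hmemK k).mpr (List.mem_map.mpr ⟨r, hr, by simpa using hrk⟩))
  have hsum : (((pv_group md).keys.map (fun k => PySem.List.sorted ((pv_group md).getD k []) (fun x => x.1))).map List.length).sum = md.length := by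
    rw [List.map_map]
    have hc : (pv_group md).keys.map (List.length ∘ fun k => PySem.List.sorted ((pv_group md).getD k []) (fun x => x.1))
        = (pv_group md).keys.map (fun c => ((md.map (fun p => (p.2.2, (p.2.1, p.1)))).filter (fun r => r.1 == c)).length) := by
      apply List.map_congr_left
      intro k _
      simp only [Function.comp_apply, PySem.List.length_sorted, hval k, List.length_map]
    rw [hc, partition_len _ _ hndK (fun r hr => (hmemK r.1).mpr (List.mem_map.mpr ⟨r, hr, rfl⟩))]
    simp
  exact glue_main pop md.length (pv_group md) hndK hne0 hsum hout0 (by simpa using hpre)
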